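-- pv_equiv track=rewrite | github.com/Akshitpatel181/HIT-Assignment-2 | question no 2 chp 2 part 1.py | separate_and_convert
-- ===== SOURCE A (Python) =====
-- def separate_and_convert(s):
--     """
--     Separates numbers and letters from the input string and converts even numbers to ASCII values,
--     and upper-case letters to their ASCII values.
--
--     Parameters:
--     s (str): Input string containing both numbers and letters.
--
--     Returns:
--     str: String of even numbers.
--     str: String of upper-case letters.
--     list: ASCII values of even numbers.
--     list: ASCII values of upper-case letters.
--     """
--
--     # Separate numbers and letters
--     number_string = ''.join([char for char in s if char.isdigit()])
--     letter_string = ''.join([char for char in s if char.isalpha()])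
--
--     # Convert even numbers to ASCII Code Decimal Values
--     even_numbers = [int(num) for num in number_string if int(num) % 2 == 0]
--     ascii_values_numbers = [ord(str(num)) for num in even_numbers]
--
--     # Convert upper-case letters to ASCII Code Decimal Values
--     upper_case_letters = [char for char in letter_string if char.isupper()]
--     ascii_values_letters = [ord(char) for char in upper_case_letters]
--
--     return ''.join(map(str, even_numbers)), ''.join(map(str, upper_case_letters)), ascii_values_numbers, ascii_values_letters
-- ===== SOURCE B (Python) =====
-- def separate_and_convert(s):
--     even_digits = []          # kept as characters; joined at the end
--     upper_letters = []
--     ascii_nums = []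
--     ascii_letters = []
--     for ch in s:
--         if ch.isdigit():
--             if int(ch) % 2 == 0:
--                 even_digits.append(ch)
--                 ascii_nums.append(ord(ch))
--         elif ch.isalpha() and ch.isupper():
--             upper_letters.append(ch)
--             ascii_letters.append(ord(ch))
--     return ''.join(even_digits), ''.join(upper_letters), ascii_nums, ascii_letters
-- ===== Notes on version B (the rewrite author's own statement) =====
-- stated objective: faster
-- what changed: Replaces A's six separate list passes (two filters over s, a filter+int re-parse, two maps, plus joins of str-mapped lists) by one fused loop over s that keeps even digits and upper-case letters as characters and appends all four results as it goes, never converting back and forth through int/str.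
import Mathlib
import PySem

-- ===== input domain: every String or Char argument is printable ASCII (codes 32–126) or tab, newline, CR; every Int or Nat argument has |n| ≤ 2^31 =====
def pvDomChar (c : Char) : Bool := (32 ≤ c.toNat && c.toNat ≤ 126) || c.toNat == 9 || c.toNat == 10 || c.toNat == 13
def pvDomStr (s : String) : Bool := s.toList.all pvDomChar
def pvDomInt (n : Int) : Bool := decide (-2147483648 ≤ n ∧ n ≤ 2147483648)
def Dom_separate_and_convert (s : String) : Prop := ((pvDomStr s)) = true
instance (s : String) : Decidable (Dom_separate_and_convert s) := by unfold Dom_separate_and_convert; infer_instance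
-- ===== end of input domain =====

-- B fuses A's six filter/map passes and its int/str round-trips into one loop over s
-- that collects all four results directly (constant-factor objective, proved equal on Dom).


-- ===== PORT A =====
-- int(num) on a char A has already filtered with isdigit: PySem.Int.ofChars? is some there
-- (on the ASCII domain isdigit chars are '0'..'9'), so .getD 0 is exact; ord(str(num)) is the
-- single character str(num) read back as its code point (str(num) has length 1 for a digit).
def separate_and_convert (s : String) : String × String × List Int × List Int :=
  let number_string := s.toList.filter (fun char => PySem.Chars.isdigit char)
  let letter_string := s.toList.filter (fun char => PySem.Chars.isalpha char)
  let even_numbers :=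
    (number_string.filter
      (fun num => PySem.Int.mod ((PySem.Int.ofChars? [num]).getD 0) 2 == 0)).map
      (fun num => (PySem.Int.ofChars? [num]).getD 0)
  let ascii_values_numbers :=
    even_numbers.map (fun num => (((PySem.Int.toChars num).headD ' ').toNat : Int))
  let upper_case_letters := letter_string.filter (fun char => PySem.Chars.isupper char)
  let ascii_values_letters := upper_case_letters.map (fun char => (char.toNat : Int))
  (String.ofList (PySem.Chars.join [] (even_numbers.map (fun num => PySem.Int.toChars num))),
   String.ofList (PySem.Chars.join [] (upper_case_letters.map (fun char => [char]))),
   ascii_values_numbers, ascii_values_letters)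

-- ===== PORT B =====
-- one fused pass: the loop body of Source B
def sacStep (st : List Char × List Char × List Int × List Int) (ch : Char) :
    List Char × List Char × List Int × List Int :=
  let (ev, up, an, al) := st
  if PySem.Chars.isdigit ch then
    if PySem.Int.mod ((PySem.Int.ofChars? [ch]).getD 0) 2 == 0 then
      (ev ++ [ch], up, an ++ [(ch.toNat : Int)], al)
    else (ev, up, an, al)
  else if PySem.Chars.isalpha ch && PySem.Chars.isupper ch then
    (ev, up ++ [ch], an, al ++ [(ch.toNat : Int)])
  else (ev, up, an, al)

def separate_and_convert_alt (s : String) : String × String × List Int × List Int :=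
  let r := s.toList.foldl sacStep ([], [], [], [])
  (String.ofList r.1, String.ofList r.2.1, r.2.2.1, r.2.2.2)

-- ===== PRECONDITION & SPEC =====
def Spec_separate_and_convert (s : String) (out : String × String × List Int × List Int) : Prop := out = separate_and_convert_alt s
instance (s : String) (out : String × String × List Int × List Int) : Decidable (Spec_separate_and_convert s out) := by unfold Spec_separate_and_convert; infer_instance

-- ===== CLAIM (what is proved, stated in full; the proofs are below) =====
def Claim_equal_separate_and_convert : Prop := ∀ (s : String), Dom_separate_and_convert s → Spec_separate_and_convert s (separate_and_convert s)

-- ===== LEMMAS AND PROOFS =====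

-- canonical predicates for the fused loop
def sacPD (c : Char) : Bool :=
  PySem.Chars.isdigit c && (PySem.Int.mod ((PySem.Int.ofChars? [c]).getD 0) 2 == 0)
def sacPU (c : Char) : Bool :=
  !PySem.Chars.isdigit c && (PySem.Chars.isalpha c && PySem.Chars.isupper c)

lemma sac_char_eq (c d : Char) {n : Nat} (h : c.val.toNat = n) (hd : d.val.toNat = n) :
    c = d := Char.ext (UInt32.toNat_inj.mp (h.trans hd.symm))

lemma sac_digit_bounds (c : Char) (h : PySem.Chars.isdigit c = true) :
    48 ≤ c.val.toNat ∧ c.val.toNat ≤ 57 := by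
  simp only [PySem.Chars.isdigit, Bool.and_eq_true, decide_eq_true_eq] at h
  exact ⟨UInt32.le_iff_toNat_le.mp h.1, UInt32.le_iff_toNat_le.mp h.2⟩

lemma sac_toChars_digit (c : Char) (h : PySem.Chars.isdigit c = true) :
    PySem.Int.toChars ((PySem.Int.ofChars? [c]).getD 0) = [c] := by
  obtain ⟨h1, h2⟩ := sac_digit_bounds c h
  have hv : c.val.toNat = 48 ∨ c.val.toNat = 49 ∨ c.val.toNat = 50 ∨ c.val.toNat = 51 ∨
      c.val.toNat = 52 ∨ c.val.toNat = 53 ∨ c.val.toNat = 54 ∨ c.val.toNat = 55 ∨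
      c.val.toNat = 56 ∨ c.val.toNat = 57 := by omega
  rcases hv with hv|hv|hv|hv|hv|hv|hv|hv|hv|hv <;> first
    | (rw [sac_char_eq c '0' hv rfl]; decide)
    | (rw [sac_char_eq c '1' hv rfl]; decide)
    | (rw [sac_char_eq c '2' hv rfl]; decide)
    | (rw [sac_char_eq c '3' hv rfl]; decide)
    | (rw [sac_char_eq c '4' hv rfl]; decide)
    | (rw [sac_char_eq c '5' hv rfl]; decide)
    | (rw [sac_char_eq c '6' hv rfl]; decide)
    | (rw [sac_char_eq c '7' hv rfl]; decide)
    | (rw [sac_char_eq c '8' hv rfl]; decide)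
    | (rw [sac_char_eq c '9' hv rfl]; decide)

lemma sac_not_upper_of_digit (c : Char) (h : PySem.Chars.isdigit c = true) :
    PySem.Chars.isupper c = false := by
  simp only [PySem.Chars.isdigit, Bool.and_eq_true, decide_eq_true_eq] at h
  have hA : ¬ ('A' ≤ c) := fun hA => (by decide : ¬ ('A' : Char) ≤ '9') (le_trans hA h.2)
  simp [PySem.Chars.isupper, hA]

lemma sac_loop (cs : List Char) (ev up : List Char) (an al : List Int) :
    cs.foldl sacStep (ev, up, an, al) =
      (ev ++ cs.filter sacPD,
       up ++ cs.filter sacPU,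
       an ++ (cs.filter sacPD).map (fun c => (c.toNat : Int)),
       al ++ (cs.filter sacPU).map (fun c => (c.toNat : Int))) := by
  induction cs generalizing ev up an al with
  | nil => simp
  | cons c cs ih =>
    by_cases hd : PySem.Chars.isdigit c
    · by_cases he : (2 : Int) ∣ (PySem.Int.ofChars? [c]).getD 0
      · simp [sacStep, hd, he, ih, sacPD, sacPU, List.filter_cons]
      · simp [sacStep, hd, he, ih, sacPD, sacPU, List.filter_cons]
    · by_cases hu : PySem.Chars.isalpha c && PySem.Chars.isupper c
      · simp [sacStep, hd, hu, ih, sacPD, sacPU, List.filter_cons]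
      · simp [sacStep, hd, hu, ih, sacPD, sacPU, List.filter_cons]

lemma sac_filterU (cs : List Char) :
    (cs.filter (fun c => PySem.Chars.isalpha c)).filter (fun c => PySem.Chars.isupper c)
      = cs.filter sacPU := by
  rw [List.filter_filter]
  apply List.filter_congr
  intro c _
  by_cases hd : PySem.Chars.isdigit c
  · simp [sacPU, hd, sac_not_upper_of_digit c hd]
  · simp [sacPU, hd, Bool.and_comm]

lemma sac_filterD (cs : List Char) :
    (cs.filter (fun c => PySem.Chars.isdigit c)).filter
        (fun c => PySem.Int.mod ((PySem.Int.ofChars? [c]).getD 0) 2 == 0)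
      = cs.filter sacPD := by
  rw [List.filter_filter]
  apply List.filter_congr
  intro c _
  simp [sacPD, Bool.and_comm]

-- ===== VERDICT (by name: the statement is the Claim_ definition above) =====
theorem separate_and_convert_spec : Claim_equal_separate_and_convert := by
  intro s _
  show separate_and_convert s = separate_and_convert_alt s
  unfold separate_and_convert separate_and_convert_alt
  dsimp only
  rw [sac_loop, sac_filterU, sac_filterD]
  simp only [List.nil_append]
  have hdig : ∀ c ∈ s.toList.filter sacPD, PySem.Chars.isdigit c = true := by
    intro c hc
    have := List.of_mem_filter hc
    simp [sacPD] at this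
    exact this.1
  refine Prod.ext ?_ (Prod.ext ?_ (Prod.ext ?_ rfl)) <;> dsimp only
  · congr 1
    rw [List.map_map]
    have : ∀ c ∈ s.toList.filter sacPD,
        (PySem.Int.toChars ((PySem.Int.ofChars? [c]).getD 0)) = [c] := fun c hc =>
      sac_toChars_digit c (hdig c hc)
    calc PySem.Chars.join []
          ((s.toList.filter sacPD).map
            ((fun num => PySem.Int.toChars num) ∘ fun num => (PySem.Int.ofChars? [num]).getD 0))
        = PySem.Chars.join [] ((s.toList.filter sacPD).map (fun c => [c])) := by
          congr 1; exact List.map_congr_left this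
      _ = s.toList.filter sacPD := PySem.Chars.join_nil_singletons _
  · congr 1
    exact PySem.Chars.join_nil_singletons _
  · rw [List.map_map]
    apply List.map_congr_left
    intro c hc
    simp [sac_toChars_digit c (hdig c hc)]
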